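-- pv_equiv track=rewrite | github.com/reutDayan1/turbo-fishstick | hill_climbing.py | min_enemy
-- ===== SOURCE A (Python) =====
-- def enemy_cost1(queens:list):
--     """
--     :param queens:list that describes the location of the queens
--     :return:The number of threats on the board
--     """
--     count = 0
--     for i in range(len(queens)):
--         for j in range(i+1,len(queens)):
--             if (queens[i] == queens[j]) or (abs(queens[i]-queens[j]) == abs(j-i)):
--                 count += 1
--     return count
--
-- def min_enemy(current: list, i):
--     """
--     :param current:list that describes the location of the queens
--     :return:the board with the min enemy
--     """
--     min_current = current[:]
--     number_of_enemy = enemy_cost1(min_current)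
--     for j in range(len(current)):
--         copy_current = current[:]
--         if current[i] != j:
--             copy_current[i] = j
--             c = enemy_cost1(copy_current)
--             if c < number_of_enemy:
--                 number_of_enemy = c
--                 min_current = copy_current
--     return min_current
-- ===== SOURCE B (Python) =====
-- def min_enemy(current: list, i):
--     """
--     :param current:list that describes the location of the queens
--     :return:the board with the min enemy
--     """
--     n = len(current)
--     if n == 0:
--         return current[:]
--     i %= n
--     row0 = current[i]
--
--     def conf(r):
--         # conflicts of a queen placed at column i, row r, with the other queens
--         c = 0
--         for k in range(n):
--             if k != i and (current[k] == r or abs(current[k] - r) == abs(k - i)):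
--                 c += 1
--         return c
--
--     base = conf(row0)
--     best_delta = 0
--     best_row = row0
--     for j in range(n):
--         if j != row0:
--             d = conf(j) - base
--             if d < best_delta:
--                 best_delta = d
--                 best_row = j
--     res = current[:]
--     res[i] = best_row
--     return res
-- ===== Notes on version B (the rewrite author's own statement) =====
-- stated objective: faster
-- what changed: Instead of recomputing the full O(n^2) board cost for every candidate row, B computes each candidate's cost change as a delta (conflicts of queen i at the new row minus at its current row, O(n) each) and never evaluates the full pairwise cost at all.
import Mathlib
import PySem

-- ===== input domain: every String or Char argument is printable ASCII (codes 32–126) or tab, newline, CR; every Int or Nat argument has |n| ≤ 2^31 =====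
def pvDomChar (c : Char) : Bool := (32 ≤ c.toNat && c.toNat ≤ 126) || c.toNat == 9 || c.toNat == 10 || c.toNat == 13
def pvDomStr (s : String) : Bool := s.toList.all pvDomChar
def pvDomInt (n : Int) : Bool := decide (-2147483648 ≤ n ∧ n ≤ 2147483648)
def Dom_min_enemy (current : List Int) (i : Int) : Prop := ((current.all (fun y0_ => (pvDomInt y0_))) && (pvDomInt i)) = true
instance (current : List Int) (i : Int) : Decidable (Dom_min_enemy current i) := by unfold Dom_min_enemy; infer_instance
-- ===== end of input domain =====

-- B replaces A's per-candidate full O(n^2) board recount by an O(n) conflict delta for the moved queen (objective: faster, O(n^3) → O(n^2)).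

-- ===== PORT A =====
def enemy_cost1 (queens : List Int) : Int :=
  (PySem.List.pyRange 0 queens.length 1).foldl (fun count i =>
    (PySem.List.pyRange (i + 1) queens.length 1).foldl (fun count j =>
      if PySem.List.pyGetD queens i 0 = PySem.List.pyGetD queens j 0 ∨
         |PySem.List.pyGetD queens i 0 - PySem.List.pyGetD queens j 0| = |j - i| then
        count + 1
      else count) count) 0

def min_enemy (current : List Int) (i : Int) : List Int :=
  let min_current := current
  let number_of_enemy := enemy_cost1 min_current
  let st := (PySem.List.pyRange 0 current.length 1).foldl
    (fun (st : Int × List Int) j =>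
      if PySem.List.pyGetD current i 0 ≠ j then
        let copy_current := PySem.List.pySetD current i j
        let c := enemy_cost1 copy_current
        if c < st.1 then (c, copy_current) else st
      else st)
    (number_of_enemy, min_current)
  st.2

-- ===== PORT B =====
def min_enemy_alt (current : List Int) (i : Int) : List Int :=
  let n : Int := current.length
  if n = 0 then current
  else
    let ii := PySem.Int.mod i n
    let row0 := PySem.List.pyGetD current ii 0
    let conf : Int → Int := fun r =>
      (PySem.List.pyRange 0 n 1).foldl (fun c k =>
        if k ≠ ii ∧ (PySem.List.pyGetD current k 0 = r ∨
                     |PySem.List.pyGetD current k 0 - r| = |k - ii|) then c + 1 else c) 0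
    let base := conf row0
    let st := (PySem.List.pyRange 0 n 1).foldl
      (fun (st : Int × Int) j =>
        if j ≠ row0 then
          let d := conf j - base
          if d < st.1 then (d, j) else st
        else st)
      (0, row0)
    PySem.List.pySetD current ii st.2

-- ===== PRECONDITION & SPEC =====
-- Pre_ excludes exactly the inputs where A raises IndexError: a nonempty board with the
-- queen index i outside [-len, len) (A reads current[i] inside its loop).
def Pre_min_enemy (current : List Int) (i : Int) : Prop :=
  current = [] ∨ PySem.Raise.InRange current.length i
instance (current : List Int) (i : Int) : Decidable (Pre_min_enemy current i) := by
  unfold Pre_min_enemy; infer_instance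
def pvWitness_min_enemy : List Int × Int := ([0, 2, 1], 1)

def Spec_min_enemy (current : List Int) (i : Int) (out : List Int) : Prop := out = min_enemy_alt current i
instance (current : List Int) (i : Int) (out : List Int) : Decidable (Spec_min_enemy current i out) := by unfold Spec_min_enemy; infer_instance

-- ===== CLAIM (what is proved, stated in full; the proofs are below) =====
def Claim_equal_min_enemy : Prop := ∀ (current : List Int) (i : Int), Dom_min_enemy current i → Pre_min_enemy current i → Spec_min_enemy current i (min_enemy current i)

-- ===== LEMMAS AND PROOFS =====

-- proof-side vocabulary
def gD (q : List Int) (k : Int) : Int := PySem.List.pyGetD q k 0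
def thr (a b d : Int) : Int := if a = b ∨ |a - b| = d then (1 : Int) else 0
def innerI (q : List Int) (lo hi a : Int) : Int :=
  ((PySem.List.pyRange lo hi 1).map (fun j => thr (gD q a) (gD q j) |j - a|)).sum
def costI (q : List Int) : Int :=
  ((PySem.List.pyRange 0 q.length 1).map (fun a => innerI q (a + 1) q.length a)).sum
def confI (q : List Int) (t r : Int) : Int :=
  ((PySem.List.pyRange 0 q.length 1).map
    (fun k => if k = t then 0 else thr (gD q k) r |k - t|)).sum

theorem thr_comm (a b d : Int) : thr a b d = thr b a d := by
  unfold thr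
  rw [abs_sub_comm]
  simp [eq_comm]

-- A's helper computes costI
theorem enemy_eq_costI (q : List Int) : enemy_cost1 q = costI q := by
  unfold enemy_cost1 costI innerI
  have hinner : ∀ (a : Int) (c : Int),
      (PySem.List.pyRange (a + 1) q.length 1).foldl (fun count j =>
        if PySem.List.pyGetD q a 0 = PySem.List.pyGetD q j 0 ∨
           |PySem.List.pyGetD q a 0 - PySem.List.pyGetD q j 0| = |j - a| then
          count + 1
        else count) c
      = c + ((PySem.List.pyRange (a + 1) q.length 1).map
              (fun j => thr (gD q a) (gD q j) |j - a|)).sum := by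
    intro a c
    have hfun : (fun (count : Int) (j : Int) =>
        if PySem.List.pyGetD q a 0 = PySem.List.pyGetD q j 0 ∨
           |PySem.List.pyGetD q a 0 - PySem.List.pyGetD q j 0| = |j - a| then
          count + 1
        else count)
        = fun (count : Int) (j : Int) => count + thr (gD q a) (gD q j) |j - a| := by
      funext c j
      unfold thr gD
      split_ifs <;> simp
    rw [hfun, PySem.List.foldl_add]
  have houter : (fun (count : Int) (a : Int) =>
      (PySem.List.pyRange (a + 1) q.length 1).foldl (fun count j =>
        if PySem.List.pyGetD q a 0 = PySem.List.pyGetD q j 0 ∨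
           |PySem.List.pyGetD q a 0 - PySem.List.pyGetD q j 0| = |j - a| then
          count + 1
        else count) count)
      = fun (count : Int) (a : Int) => count +
          ((PySem.List.pyRange (a + 1) q.length 1).map
            (fun j => thr (gD q a) (gD q j) |j - a|)).sum := by
    funext c a; exact hinner a c
  rw [houter, PySem.List.foldl_add, zero_add]

-- getD facts on a set list
theorem gD_set_self (q : List Int) (v : Int) (t : Nat) (ht : t < q.length) :
    gD (q.set t v) (t : Int) = v := by
  unfold gD
  rw [PySem.List.pyGetD_natCast]
  simp [List.getD, ht]

theorem gD_set_ne (q : List Int) (v : Int) (t : Nat) (k : Int) (hk : 0 ≤ k) (hne : k ≠ (t : Int)) :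
    gD (q.set t v) k = gD q k := by
  unfold gD
  obtain ⟨m, rfl⟩ := Int.eq_ofNat_of_zero_le hk
  rw [PySem.List.pyGetD_natCast, PySem.List.pyGetD_natCast]
  have : m ≠ t := by omega
  simp [List.getD, List.getElem?_set_ne (Ne.symm this)]

theorem set_gD_self (q : List Int) (t : Nat) (ht : t < q.length) :
    q.set t (gD q (t : Int)) = q := by
  unfold gD
  rw [PySem.List.pyGetD_natCast]
  have : q.getD t 0 = q[t] := List.getD_eq_getElem q 0 ht
  rw [this, List.set_getElem_self]

theorem innerI_set_ne (q : List Int) (v : Int) (t : Nat) (lo hi a : Int)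
    (hlo : 0 ≤ lo) (ha0 : 0 ≤ a) (hat : a ≠ (t : Int))
    (hrange : ∀ j : Int, lo ≤ j → j < hi → j ≠ (t : Int)) :
    innerI (q.set t v) lo hi a = innerI q lo hi a := by
  unfold innerI
  congr 1
  apply List.map_congr_left
  intro j hj
  rw [PySem.List.mem_pyRange_one] at hj
  rw [gD_set_ne q v t a ha0 hat, gD_set_ne q v t j (by omega) (hrange j hj.1 hj.2)]

theorem innerI_split (q : List Int) (a t n : Int) (h1 : a < t) (h2 : t < n) :
    innerI q (a + 1) n a
      = innerI q (a + 1) t a + thr (gD q a) (gD q t) |t - a| + innerI q (t + 1) n a := by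
  unfold innerI
  rw [PySem.List.pyRange_one_append (a + 1) t n (by omega) (by omega),
      PySem.List.pyRange_one_cons h2]
  simp [add_assoc]

theorem confI_split (q : List Int) (t : Nat) (ht : t < q.length) (r : Int) :
    confI q t r
      = ((PySem.List.pyRange 0 t 1).map (fun k => thr (gD q k) r |k - t|)).sum
        + ((PySem.List.pyRange (t + 1) q.length 1).map (fun k => thr (gD q k) r |k - t|)).sum := by
  have e1 : ((PySem.List.pyRange 0 (t : Int) 1).map
        (fun k => if k = (t : Int) then 0 else thr (gD q k) r |k - t|))
      = (PySem.List.pyRange 0 (t : Int) 1).map (fun k => thr (gD q k) r |k - t|) := by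
    apply List.map_congr_left
    intro k hk
    rw [PySem.List.mem_pyRange_one] at hk
    rw [if_neg (by omega)]
  have e2 : ((PySem.List.pyRange ((t : Int) + 1) q.length 1).map
        (fun k => if k = (t : Int) then 0 else thr (gD q k) r |k - t|))
      = (PySem.List.pyRange ((t : Int) + 1) q.length 1).map (fun k => thr (gD q k) r |k - t|) := by
    apply List.map_congr_left
    intro k hk
    rw [PySem.List.mem_pyRange_one] at hk
    rw [if_neg (by omega)]
  unfold confI
  rw [PySem.List.pyRange_one_append 0 (t : Int) q.length (by exact_mod_cast Nat.zero_le t)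
        (by exact_mod_cast Nat.le_of_lt ht),
      PySem.List.pyRange_one_cons (a := (t : Int)) (b := (q.length : Int)) (by exact_mod_cast ht),
      List.map_append, List.sum_append, List.map_cons, List.sum_cons, if_pos rfl, zero_add,
      e1, e2]

-- THE DELTA LEMMA: changing queen t's row changes the cost by the conflict delta of queen t
theorem tri_sum (l : List Int) (f g h : Int → Int) :
    (l.map (fun a => f a + g a + h a)).sum = (l.map f).sum + (l.map g).sum + (l.map h).sum := by
  rw [PySem.List.sum_map_add_int l (fun a => f a + g a) h, PySem.List.sum_map_add_int l f g]

theorem cost_set (q : List Int) (t : Nat) (ht : t < q.length) (v : Int) :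
    costI (q.set t v) + confI q t (gD q t) = costI q + confI q t v := by
  have htn : (t : Int) < (q.length : Int) := by exact_mod_cast ht
  have h0t : (0 : Int) ≤ (t : Int) := by exact_mod_cast Nat.zero_le t
  -- split any sum over range(0, len) at t
  have osplit : ∀ (f : Int → Int), ((PySem.List.pyRange 0 (q.length : Int) 1).map f).sum
      = ((PySem.List.pyRange 0 (t : Int) 1).map f).sum + f t
        + ((PySem.List.pyRange ((t : Int) + 1) (q.length : Int) 1).map f).sum := by
    intro f
    rw [PySem.List.pyRange_one_append 0 (t : Int) (q.length : Int) h0t htn.le,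
        PySem.List.pyRange_one_cons (a := (t : Int)) (b := (q.length : Int)) htn,
        List.map_append, List.sum_append, List.map_cons, List.sum_cons]
    ring
  -- the tail sum (a > t) is unchanged by the set
  have hS2 : ((PySem.List.pyRange ((t : Int) + 1) (q.length : Int) 1).map
        (fun a => innerI (q.set t v) (a + 1) (q.length : Int) a)).sum
      = ((PySem.List.pyRange ((t : Int) + 1) (q.length : Int) 1).map
        (fun a => innerI q (a + 1) (q.length : Int) a)).sum := by
    congr 1
    apply List.map_congr_left
    intro a ha
    rw [PySem.List.mem_pyRange_one] at ha
    exact innerI_set_ne q v t (a + 1) (q.length : Int) a (by omega) (by omega) (by omega)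
      (fun j hj _ => by omega)
  -- the middle term (a = t) becomes the conflicts of the new row with the tail
  have hmid' : innerI (q.set t v) ((t : Int) + 1) (q.length : Int) (t : Int)
      = ((PySem.List.pyRange ((t : Int) + 1) (q.length : Int) 1).map
          (fun j => thr (gD q j) v |j - (t : Int)|)).sum := by
    unfold innerI
    congr 1
    apply List.map_congr_left
    intro j hj
    rw [PySem.List.mem_pyRange_one] at hj
    rw [gD_set_self q v t ht, gD_set_ne q v t j (by omega) (by omega), thr_comm]
  have hmid : innerI q ((t : Int) + 1) (q.length : Int) (t : Int)
      = ((PySem.List.pyRange ((t : Int) + 1) (q.length : Int) 1).map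
          (fun j => thr (gD q j) (gD q t) |j - (t : Int)|)).sum := by
    unfold innerI
    congr 1
    apply List.map_congr_left
    intro j hj
    rw [thr_comm]
  -- the head sum (a < t): split each inner sum at j = t
  have hS1' : ((PySem.List.pyRange 0 (t : Int) 1).map
        (fun a => innerI (q.set t v) (a + 1) (q.length : Int) a)).sum
      = ((PySem.List.pyRange 0 (t : Int) 1).map (fun a => innerI q (a + 1) (t : Int) a)).sum
        + ((PySem.List.pyRange 0 (t : Int) 1).map (fun a => thr (gD q a) v |a - (t : Int)|)).sum
        + ((PySem.List.pyRange 0 (t : Int) 1).map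
            (fun a => innerI q ((t : Int) + 1) (q.length : Int) a)).sum := by
    rw [← tri_sum]
    congr 1
    apply List.map_congr_left
    intro a ha
    rw [PySem.List.mem_pyRange_one] at ha
    rw [innerI_split (q.set t v) a (t : Int) (q.length : Int) ha.2 htn]
    rw [innerI_set_ne q v t (a + 1) (t : Int) a (by omega) (by omega) (by omega)
          (fun j hj hj2 => by omega),
        innerI_set_ne q v t ((t : Int) + 1) (q.length : Int) a (by omega) (by omega) (by omega)
          (fun j hj _ => by omega),
        gD_set_ne q v t a (by omega) (by omega), gD_set_self q v t ht, abs_sub_comm (t : Int) a]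
  have hS1 : ((PySem.List.pyRange 0 (t : Int) 1).map
        (fun a => innerI q (a + 1) (q.length : Int) a)).sum
      = ((PySem.List.pyRange 0 (t : Int) 1).map (fun a => innerI q (a + 1) (t : Int) a)).sum
        + ((PySem.List.pyRange 0 (t : Int) 1).map
            (fun a => thr (gD q a) (gD q t) |a - (t : Int)|)).sum
        + ((PySem.List.pyRange 0 (t : Int) 1).map
            (fun a => innerI q ((t : Int) + 1) (q.length : Int) a)).sum := by
    rw [← tri_sum]
    congr 1
    apply List.map_congr_left
    intro a ha
    rw [PySem.List.mem_pyRange_one] at ha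
    rw [innerI_split q a (t : Int) (q.length : Int) ha.2 htn, abs_sub_comm (t : Int) a]
  have hcost' : costI (q.set t v)
      = ((PySem.List.pyRange 0 (t : Int) 1).map
          (fun a => innerI (q.set t v) (a + 1) (q.length : Int) a)).sum
        + innerI (q.set t v) ((t : Int) + 1) (q.length : Int) (t : Int)
        + ((PySem.List.pyRange ((t : Int) + 1) (q.length : Int) 1).map
            (fun a => innerI (q.set t v) (a + 1) (q.length : Int) a)).sum := by
    unfold costI
    simp only [List.length_set]
    exact osplit _
  have hcost : costI q
      = ((PySem.List.pyRange 0 (t : Int) 1).map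
          (fun a => innerI q (a + 1) (q.length : Int) a)).sum
        + innerI q ((t : Int) + 1) (q.length : Int) (t : Int)
        + ((PySem.List.pyRange ((t : Int) + 1) (q.length : Int) 1).map
            (fun a => innerI q (a + 1) (q.length : Int) a)).sum := by
    unfold costI
    exact osplit _
  rw [hcost', hcost, hS2, hmid', hmid, hS1', hS1,
      confI_split q t ht (gD q t), confI_split q t ht v]
  ring

def stepA (q : List Int) (t : Nat) : (Int × List Int) → Int → (Int × List Int) :=
  fun st j => if gD q (t : Int) ≠ j then
      (if enemy_cost1 (q.set t j) < st.1 then (enemy_cost1 (q.set t j), q.set t j) else st)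
    else st

def stepB (q : List Int) (t : Nat) : (Int × Int) → Int → (Int × Int) :=
  fun st j => if j ≠ gD q (t : Int) then
      (if confI q (t : Int) j - confI q (t : Int) (gD q (t : Int)) < st.1
       then (confI q (t : Int) j - confI q (t : Int) (gD q (t : Int)), j) else st)
    else st

theorem fold_rel (q : List Int) (t : Nat) (ht : t < q.length) (l : List Int)
    (stA : Int × List Int) (stB : Int × Int)
    (h1 : stA.1 = enemy_cost1 q + stB.1) (h2 : stA.2 = q.set t stB.2) :
    (l.foldl (stepA q t) stA).1 = enemy_cost1 q + (l.foldl (stepB q t) stB).1 ∧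
    (l.foldl (stepA q t) stA).2 = q.set t (l.foldl (stepB q t) stB).2 := by
  induction l generalizing stA stB with
  | nil => exact ⟨h1, h2⟩
  | cons j l ih =>
    simp only [List.foldl_cons]
    apply ih
    · -- first components after one step
      unfold stepA stepB
      by_cases hg : gD q (t : Int) ≠ j
      · rw [if_pos hg, if_pos (Ne.symm hg)]
        have hc : enemy_cost1 (q.set t j)
            = enemy_cost1 q + (confI q (t : Int) j - confI q (t : Int) (gD q (t : Int))) := by
          have := cost_set q t ht j
          rw [enemy_eq_costI, enemy_eq_costI]
          omega
        by_cases hlt : enemy_cost1 (q.set t j) < stA.1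
        · rw [if_pos hlt, if_pos (by rw [hc, h1] at hlt; omega)]
          exact hc
        · rw [if_neg hlt, if_neg (by rw [hc, h1] at hlt; omega)]
          exact h1
      · rw [if_neg hg, if_neg (by simp at hg ⊢; omega)]
        exact h1
    · -- second components after one step
      unfold stepA stepB
      by_cases hg : gD q (t : Int) ≠ j
      · rw [if_pos hg, if_pos (Ne.symm hg)]
        have hc : enemy_cost1 (q.set t j)
            = enemy_cost1 q + (confI q (t : Int) j - confI q (t : Int) (gD q (t : Int))) := by
          have := cost_set q t ht j
          rw [enemy_eq_costI, enemy_eq_costI]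
          omega
        by_cases hlt : enemy_cost1 (q.set t j) < stA.1
        · rw [if_pos hlt, if_pos (by rw [hc, h1] at hlt; omega)]
        · rw [if_neg hlt, if_neg (by rw [hc, h1] at hlt; omega)]
          exact h2
      · rw [if_neg hg, if_neg (by simp at hg ⊢; omega)]
        exact h2

-- ===== VERDICT (by name: the statement is the Claim_ definition above) =====
-- index normalization facts for a valid (possibly negative) Python index
theorem idx_facts (current : List Int) (i : Int) (hc : current ≠ [])
    (hin : PySem.Raise.InRange current.length i) :
    ∃ t : Nat, t < current.length ∧
      PySem.Int.mod i (current.length : Int) = (t : Int) ∧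
      PySem.List.pyGetD current i 0 = gD current (t : Int) ∧
      (∀ v : Int, PySem.List.pySetD current i v = current.set t v) := by
  obtain ⟨h1, h2⟩ := hin
  have hn0 : (0 : Int) < (current.length : Int) := by
    cases current with
    | nil => exact absurd rfl hc
    | cons x xs => exact_mod_cast Nat.succ_pos xs.length
  by_cases hi : 0 ≤ i
  · refine ⟨i.toNat, by omega, ?_, ?_, ?_⟩
    · rw [PySem.Int.mod_eq_emod_of_pos hn0, Int.emod_eq_of_lt hi h2]
      omega
    · unfold gD
      congr 1
      omega
    · intro v
      rw [PySem.List.pySetD_of_nonneg current v hi]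
  · have hidx : PySem.List.pyIdx? current.length i = some (current.length - (-i).toNat) := by
      simp [PySem.List.pyIdx?, not_le.mpr (not_le.mp hi), h1]
    have hteq : current.length - (-i).toNat = (i + current.length).toNat := by omega
    refine ⟨(i + current.length).toNat, by omega, ?_, ?_, ?_⟩
    · rw [PySem.Int.mod_eq_emod_of_pos hn0]
      have : i % (current.length : Int) = (i + current.length) % current.length := by simp
      rw [this, Int.emod_eq_of_lt (by omega) (by omega)]
      omega
    · unfold gD PySem.List.pyGetD PySem.List.pyGet?
      rw [hidx, hteq]
      have : PySem.List.pyIdx? current.length ((((i + current.length).toNat : Nat) : Int))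
          = some (i + current.length).toNat := by
        simp [PySem.List.pyIdx?]
        omega
      rw [this]
    · intro v
      unfold PySem.List.pySetD PySem.List.pySet?
      rw [hidx, hteq]
      rfl

theorem min_enemy_spec : Claim_equal_min_enemy := by
  intro current i _ hpre
  unfold Spec_min_enemy
  by_cases hc : current = []
  · subst hc
    rfl
  · have hin : PySem.Raise.InRange current.length i := by
      rcases hpre with h | h
      · exact absurd h hc
      · exact h
    obtain ⟨t, ht, hmod, hget, hsetv⟩ := idx_facts current i hc hin
    have hn0 : ¬ ((current.length : Int) = 0) := by
      cases current with
      | nil => exact absurd rfl hc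
      | cons x xs => omega
    -- A side
    have hA : min_enemy current i
        = ((PySem.List.pyRange 0 (current.length : Int) 1).foldl (stepA current t)
            (enemy_cost1 current, current)).2 := by
      show ((PySem.List.pyRange 0 (current.length : Int) 1).foldl
          (fun (st : Int × List Int) j =>
            if PySem.List.pyGetD current i 0 ≠ j then
              (if enemy_cost1 (PySem.List.pySetD current i j) < st.1
               then (enemy_cost1 (PySem.List.pySetD current i j), PySem.List.pySetD current i j)
               else st)
            else st)
          (enemy_cost1 current, current)).2 = _
      congr 1
      apply PySem.List.foldl_congr_mem
      intro st j _
      unfold stepA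
      rw [hget, hsetv j]
    -- B side
    have hconf : ∀ r : Int,
        (PySem.List.pyRange 0 (current.length : Int) 1).foldl (fun c k =>
          if k ≠ (t : Int) ∧ (PySem.List.pyGetD current k 0 = r ∨
              |PySem.List.pyGetD current k 0 - r| = |k - (t : Int)|) then c + 1 else c) 0
        = confI current (t : Int) r := by
      intro r
      have hfun : (fun (c : Int) (k : Int) =>
          if k ≠ (t : Int) ∧ (PySem.List.pyGetD current k 0 = r ∨
              |PySem.List.pyGetD current k 0 - r| = |k - (t : Int)|) then c + 1 else c)
          = fun (c : Int) (k : Int) =>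
              c + (if k = (t : Int) then 0 else thr (gD current k) r |k - (t : Int)|) := by
        funext c k
        unfold thr gD
        by_cases hk : k = (t : Int)
        · simp [hk]
        · simp only [if_neg hk]
          split_ifs with h1 h2 h2 <;> simp_all
      rw [hfun, PySem.List.foldl_add, zero_add]
      rfl
    have hB : min_enemy_alt current i
        = current.set t ((PySem.List.pyRange 0 (current.length : Int) 1).foldl (stepB current t)
            (0, gD current (t : Int))).2 := by
      unfold min_enemy_alt
      rw [if_neg hn0]
      simp only [hmod]
      rw [PySem.List.pySetD_natCast]
      congr 1
      congr 1
      unfold gD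
      apply PySem.List.foldl_congr_mem
      intro st j _
      rw [hconf j, hconf (PySem.List.pyGetD current ((t : Nat) : Int) 0)]
      unfold stepB gD
      rfl
    rw [hA, hB]
    exact (fold_rel current t ht _ (enemy_cost1 current, current) (0, gD current (t : Int))
      (by simp) ((set_gD_self current t ht).symm)).2
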